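-- pv_equiv track=rewrite | github.com/comp110-23f/comp110-workspace-melanieohta | practice/reverse_multiply.py | reverse_multiply
-- ===== SOURCE A (Python) =====
-- def reverse_multiply(nums: list[int]) -> list[int]:
--     result: list[int] = [0] * len(nums)
--     i: int = 1
--     for num in nums:
--         num *= 2
--         result[len(nums) - i] = num
--         i+= 1
--     return result
-- ===== SOURCE B (Python) =====
-- def reverse_multiply(nums: list[int]) -> list[int]:
--     out: list[int] = []
--     stack: list[int] = list(nums)
--     while stack:
--         out.append(stack.pop() * 2)
--     return out
-- ===== Notes on version B (the rewrite author's own statement) =====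
-- stated objective: alternative
-- what changed: B consumes a copied stack back-to-front with pop() in a while loop, appending doubled elements, instead of A's single indexed forward pass writing into a preallocated zero array with mirrored-index arithmetic.
import Mathlib
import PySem

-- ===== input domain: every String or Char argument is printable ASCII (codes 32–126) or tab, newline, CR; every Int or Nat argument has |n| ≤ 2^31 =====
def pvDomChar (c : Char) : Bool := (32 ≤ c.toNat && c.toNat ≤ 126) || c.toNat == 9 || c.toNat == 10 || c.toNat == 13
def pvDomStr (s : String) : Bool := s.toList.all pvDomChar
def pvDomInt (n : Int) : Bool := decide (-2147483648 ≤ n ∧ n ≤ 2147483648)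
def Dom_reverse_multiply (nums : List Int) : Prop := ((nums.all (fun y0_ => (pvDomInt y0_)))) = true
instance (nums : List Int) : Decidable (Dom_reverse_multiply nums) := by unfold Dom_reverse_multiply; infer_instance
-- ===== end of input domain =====

-- B consumes a copied stack with pop() in a while loop instead of A's indexed forward
-- write into a preallocated zero array; return values proved equal, neither mutates its input.

-- ===== PORT A =====
-- result = [0]*len(nums); i = 1; for num in nums: num *= 2; result[len(nums)-i] = num; i += 1
def reverse_multiply (nums : List Int) : List Int :=
  (nums.foldl
    (fun (st : List Int × Int) num =>
      let num := num * 2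
      (PySem.List.pySetD st.1 ((nums.length : Int) - st.2) num, st.2 + 1))
    (List.replicate nums.length 0, 1)).1

-- ===== PORT B =====
-- while stack: out.append(stack.pop() * 2)
def rmLoop (stack out : List Int) : List Int :=
  match h : stack.getLast? with
  | none => out
  | some x => rmLoop stack.dropLast (out ++ [x * 2])
termination_by stack.length
decreasing_by
  have hne : stack ≠ [] := by intro hn; simp [hn] at h
  have : stack.dropLast.length < stack.length := by
    rw [List.length_dropLast]
    have := List.length_pos_of_ne_nil hne
    omega
  simpa using this

-- out = []; stack = list(nums); <loop>; return out
def reverse_multiply_alt (nums : List Int) : List Int :=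
  rmLoop nums []

-- ===== PRECONDITION & SPEC =====
def Spec_reverse_multiply (nums : List Int) (out : List Int) : Prop := out = reverse_multiply_alt nums
instance (nums : List Int) (out : List Int) : Decidable (Spec_reverse_multiply nums out) := by unfold Spec_reverse_multiply; infer_instance

-- ===== CLAIM (what is proved, stated in full; the proofs are below) =====
def Claim_equal_reverse_multiply : Prop := ∀ (nums : List Int), Dom_reverse_multiply nums → Spec_reverse_multiply nums (reverse_multiply nums)

-- ===== LEMMAS AND PROOFS =====

theorem pv_drop_set_cons (res : List Int) (k : Nat) (v : Int) (h : k < res.length) :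
    (res.set k v).drop k = v :: res.drop (k + 1) := by
  rw [List.drop_eq_getElem_cons (by simpa using h)]
  simp [List.getElem_set_self, List.drop_set]

theorem pv_loop_inv (L : Nat) (xs : List Int) : ∀ (res : List Int), res.length = L → xs.length ≤ L →
    (xs.foldl
      (fun (st : List Int × Int) num =>
        (PySem.List.pySetD st.1 ((L : Int) - st.2) (num * 2), st.2 + 1))
      (res, (L : Int) - xs.length + 1)).1
    = (xs.map (fun n => n * 2)).reverse ++ res.drop xs.length := by
  induction xs with
  | nil => intro res hlen _; simp
  | cons n t ih =>
    intro res hlen hle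
    have hklt : t.length < res.length := by simp at hle ⊢; omega
    have hidx : (L : Int) - ((L : Int) - ((n :: t).length : Int) + 1) = (t.length : Nat) := by
      simp only [List.length_cons]; push_cast; ring
    have hset : PySem.List.pySetD res ((L : Int) - ((L : Int) - ((n :: t).length : Int) + 1)) (n * 2)
        = res.set t.length (n * 2) := by
      rw [hidx, PySem.List.pySetD_natCast]
    have hcnt : ((L : Int) - ((n :: t).length : Int) + 1) + 1 = (L : Int) - (t.length : Int) + 1 := by
      simp only [List.length_cons]; push_cast; ring
    simp only [List.foldl_cons, hset, hcnt]
    rw [ih (res.set t.length (n * 2)) (by simpa using hlen) (by simp at hle ⊢; omega)]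
    rw [pv_drop_set_cons res t.length (n * 2) hklt]
    simp

theorem rmLoop_eq (stack : List Int) : ∀ out, rmLoop stack out = out ++ (stack.map (fun n => n * 2)).reverse := by
  induction stack using List.reverseRecOn with
  | nil => intro out; rw [rmLoop]; simp
  | append_singleton s a ih =>
    intro out
    rw [rmLoop]
    split
    next h => simp [List.getLast?_concat] at h
    next x h =>
      have hx : x = a := by rw [List.getLast?_concat] at h; exact (Option.some_inj.mp h).symm
      subst hx
      rw [List.dropLast_concat, ih]
      simp

-- ===== VERDICT (by name: the statement is the Claim_ definition above) =====
theorem reverse_multiply_spec : Claim_equal_reverse_multiply := by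
  intro nums _
  unfold Spec_reverse_multiply reverse_multiply reverse_multiply_alt
  have h := pv_loop_inv nums.length nums (List.replicate nums.length 0) (by simp) (le_refl _)
  have hinit : ((nums.length : Int) - (nums.length : Int) + 1) = (1 : Int) := by ring
  rw [hinit] at h
  rw [h, rmLoop_eq]
  simp
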